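-- pv_equiv track=rewrite | github.com/CDBiddulph/scaffold-learning | experiments/keep_crosswords_20250711_195402/scaffolds/5-1-2-1-2/scaffold.py | get_current_pattern
-- ===== SOURCE A (Python) =====
-- def find_clue_position(clue_num, grid):
--     """Find the starting position of a clue in the grid"""
--     height = len(grid)
--     width = len(grid[0]) if height > 0 else 0
--     current_num = 1
--
--     for row in range(height):
--         for col in range(width):
--             if grid[row][col] == ".":
--                 continue
--
--             starts_across = (
--                 (col == 0 or grid[row][col - 1] == ".")
--                 and col + 1 < width
--                 and grid[row][col + 1] != "."
--             )
--             starts_down = (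
--                 (row == 0 or grid[row - 1][col] == ".")
--                 and row + 1 < height
--                 and grid[row + 1][col] != "."
--             )
--
--             if starts_across or starts_down:
--                 if current_num == clue_num:
--                     return (row, col)
--                 current_num += 1
--
--     return None
--
-- def get_clue_info(clue_num, grid, direction):
--     """Get clue position and length"""
--     pos = find_clue_position(clue_num, grid)
--     if pos is None:
--         return None, None
--
--     row, col = pos
--     height = len(grid)
--     width = len(grid[0]) if height > 0 else 0
--
--     length = 0
--     if direction == 'across':
--         for c in range(col, width):
--             if grid[row][c] == ".":
--                 break
--             length += 1
--     else:  # down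
--         for r in range(row, height):
--             if grid[r][col] == ".":
--                 break
--             length += 1
--
--     return pos, length
--
-- def get_current_pattern(clue_num, grid, direction, filled_grid):
--     """Get the current pattern for a clue with known letters"""
--     pos, length = get_clue_info(clue_num, grid, direction)
--     if pos is None:
--         return None
--
--     row, col = pos
--     pattern = []
--
--     if direction == 'across':
--         for i in range(length):
--             cell = filled_grid[row][col + i]
--             pattern.append(cell if cell != "-" else "?")
--     else:  # down
--         for i in range(length):
--             cell = filled_grid[row + i][col]
--             pattern.append(cell if cell != "-" else "?")
--
--     return "".join(pattern)
-- ===== SOURCE B (Python) =====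
-- def get_current_pattern(clue_num, grid, direction, filled_grid):
--     """Get the current pattern for a clue with known letters"""
--     height = len(grid)
--     width = len(grid[0]) if height > 0 else 0
--
--     def runs(cells):
--         # maximal runs of consecutive non-'.' cells, as (start, end_exclusive)
--         out = []
--         i = 0
--         n = len(cells)
--         while i < n:
--             if cells[i] == ".":
--                 i += 1
--             else:
--                 j = i + 1
--                 while j < n and cells[j] != ".":
--                     j += 1
--                 out.append((i, j))
--                 i = j
--         return out
--
--     row_runs = [runs([grid[r][c] for c in range(width)]) for r in range(height)]
--     col_runs = [runs([grid[r][c] for r in range(height)]) for c in range(width)]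
--
--     # numbered cells = starts of runs of length >= 2, as flat indices r*width+c
--     starts = {r * width + s for r in range(height) for (s, e) in row_runs[r] if e - s >= 2}
--     starts |= {s * width + c for c in range(width) for (s, e) in col_runs[c] if e - s >= 2}
--     order = sorted(starts)
--     if not (1 <= clue_num <= len(order)):
--         return None
--     r, c = divmod(order[clue_num - 1], width)
--
--     if direction == 'across':
--         e = next(e for (s, e) in row_runs[r] if s <= c < e)
--         cells = [filled_grid[r][j] for j in range(c, e)]
--     else:
--         e = next(e for (s, e) in col_runs[c] if s <= r < e)
--         cells = [filled_grid[i][c] for i in range(r, e)]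
--     return "".join("?" if x == "-" else x for x in cells)
-- ===== Notes on version B (the rewrite author's own statement) =====
-- stated objective: alternative
-- what changed: B decomposes each row and column into maximal runs of non-'.' cells once, derives the numbered cells as the starts of runs of length >= 2, collects them as flat indices r*width+c in a set and sorts it to index the clue_num-th start, then reads the pattern straight from the run containing the start -- no per-cell neighbour tests, no counter scan and no separate length pass as in A.
-- outside the precondition, e.g. on get_current_pattern(1, [['A', 'B'], ['C']], 'across', [['A', 'B'], ['C']]): A returns 'AB', B raises IndexError; on get_current_pattern(2, [['A', 'B']], 'across', []): A returns None, B returns None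
import Mathlib
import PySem

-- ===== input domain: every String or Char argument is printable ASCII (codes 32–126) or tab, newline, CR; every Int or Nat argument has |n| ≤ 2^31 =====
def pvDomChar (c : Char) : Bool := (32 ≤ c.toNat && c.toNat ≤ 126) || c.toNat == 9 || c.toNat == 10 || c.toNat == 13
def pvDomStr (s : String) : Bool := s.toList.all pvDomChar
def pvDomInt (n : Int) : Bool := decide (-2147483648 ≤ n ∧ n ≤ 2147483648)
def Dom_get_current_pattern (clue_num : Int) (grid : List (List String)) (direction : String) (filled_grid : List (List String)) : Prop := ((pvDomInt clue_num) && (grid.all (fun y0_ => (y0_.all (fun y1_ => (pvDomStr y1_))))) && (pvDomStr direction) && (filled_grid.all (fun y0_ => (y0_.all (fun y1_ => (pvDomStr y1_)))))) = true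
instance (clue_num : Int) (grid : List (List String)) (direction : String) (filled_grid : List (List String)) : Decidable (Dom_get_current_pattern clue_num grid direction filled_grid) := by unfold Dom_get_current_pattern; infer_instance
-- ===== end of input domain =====

-- B re-solves the task by run decomposition: rows/columns are split once into maximal non-'.' runs,
-- numbered cells are the starts of runs of length ≥ 2 collected as flat indices r*W+c in a set and sorted,
-- and the pattern is read off the run containing the clue's start; same return value on Pre_ (objective: alternative).


-- ===== PORT A =====
-- grid[r][c]; under Pre_ every access is in range, so the defaults are never the value used
def gcell (g : List (List String)) (r c : Int) : String :=
  PySem.List.pyGetD (PySem.List.pyGetD g r []) c ""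

-- A's starts_across / starts_down tests
def startsAcross (grid : List (List String)) (w row col : Int) : Bool :=
  (col == 0 || gcell grid row (col - 1) == ".") && decide (col + 1 < w) && !(gcell grid row (col + 1) == ".")

def startsDown (grid : List (List String)) (h row col : Int) : Bool :=
  (row == 0 || gcell grid (row - 1) col == ".") && decide (row + 1 < h) && !(gcell grid (row + 1) col == ".")

-- inner 'for col in range(width)' loop of find_clue_position: found position, or the updated counter
def fcpCols (clue_num : Int) (grid : List (List String)) (h w row : Int) : List Int → Int → Sum (Int × Int) Int
  | [], num => Sum.inr num
  | col :: rest, num =>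
    if gcell grid row col == "." then fcpCols clue_num grid h w row rest num
    else if startsAcross grid w row col || startsDown grid h row col then
      if num == clue_num then Sum.inl (row, col)
      else fcpCols clue_num grid h w row rest (num + 1)
    else fcpCols clue_num grid h w row rest num

-- outer 'for row in range(height)' loop
def fcpRows (clue_num : Int) (grid : List (List String)) (h w : Int) : List Int → Int → Option (Int × Int)
  | [], _ => none
  | row :: rest, num =>
    match fcpCols clue_num grid h w row (PySem.List.pyRange 0 w 1) num with
    | Sum.inl p => some p
    | Sum.inr num' => fcpRows clue_num grid h w rest num'

def find_clue_position (clue_num : Int) (grid : List (List String)) : Option (Int × Int) :=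
  let h : Int := grid.length
  let w : Int := if (0 : Int) < grid.length then ((grid.getD 0 []).length : Int) else 0
  fcpRows clue_num grid h w (PySem.List.pyRange 0 h 1) 1

-- 'for c in range(col, width): if grid[row][c] == ".": break; length += 1'
def lenAcross (grid : List (List String)) (row : Int) : List Int → Int
  | [] => 0
  | c :: rest => if gcell grid row c == "." then 0 else lenAcross grid row rest + 1

def lenDown (grid : List (List String)) (col : Int) : List Int → Int
  | [] => 0
  | r :: rest => if gcell grid r col == "." then 0 else lenDown grid col rest + 1

def get_clue_info (clue_num : Int) (grid : List (List String)) (direction : String) : Option ((Int × Int) × Int) :=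
  match find_clue_position clue_num grid with
  | none => none
  | some (row, col) =>
    let h : Int := grid.length
    let w : Int := if (0 : Int) < grid.length then ((grid.getD 0 []).length : Int) else 0
    let length : Int :=
      if direction == "across" then lenAcross grid row (PySem.List.pyRange col w 1)
      else lenDown grid col (PySem.List.pyRange row h 1)
    some ((row, col), length)

def get_current_pattern (clue_num : Int) (grid : List (List String)) (direction : String) (filled_grid : List (List String)) : Option String :=
  match get_clue_info clue_num grid direction with
  | none => none
  | some ((row, col), length) =>
    let pattern : List String :=
      if direction == "across" then
        (PySem.List.pyRange 0 length 1).map (fun i =>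
          let cell := gcell filled_grid row (col + i)
          if cell == "-" then "?" else cell)
      else
        (PySem.List.pyRange 0 length 1).map (fun i =>
          let cell := gcell filled_grid (row + i) col
          if cell == "-" then "?" else cell)
    some (PySem.Str.join "" pattern)

-- ===== PORT B =====
-- Source B's inner 'while j < n and cells[j] != "."' scan: number of leading non-'.' cells
def countRun : List String → Nat
  | [] => 0
  | x :: t => if x == "." then 0 else countRun t + 1

-- Source B's runs(cells): outer while loop over i, emitting (start, end_exclusive) of each maximal run
def runsGo : List String → Int → List (Int × Int)
  | [], _ => []
  | x :: t, i =>
    if x == "." then runsGo t (i + 1)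
    else (i, i + 1 + (countRun t : Int)) :: runsGo (t.drop (countRun t)) (i + 1 + (countRun t : Int))
termination_by cells _ => cells.length
decreasing_by
  all_goals simp

def runsB (cells : List String) : List (Int × Int) := runsGo cells 0

-- the comprehensions [grid[r][c] for c in range(width)] / [grid[r][c] for r in range(height)]
def rowCells (grid : List (List String)) (w r : Int) : List String :=
  (PySem.List.pyRange 0 w 1).map (fun c => gcell grid r c)

def colCells (grid : List (List String)) (h c : Int) : List String :=
  (PySem.List.pyRange 0 h 1).map (fun r => gcell grid r c)

def rowRunsB (grid : List (List String)) (h w : Int) : List (List (Int × Int)) :=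
  (PySem.List.pyRange 0 h 1).map (fun r => runsB (rowCells grid w r))

def colRunsB (grid : List (List String)) (h w : Int) : List (List (Int × Int)) :=
  (PySem.List.pyRange 0 w 1).map (fun c => runsB (colCells grid h c))

-- the two set comprehensions of flat indices r*width+c, united as a Python set
def startsB (grid : List (List String)) (h w : Int) : PySem.Set Int :=
  PySem.Set.union
    (PySem.Set.ofList ((PySem.List.pyRange 0 h 1).flatMap (fun r =>
      ((PySem.List.pyGetD (rowRunsB grid h w) r []).filter (fun p => decide (2 ≤ p.2 - p.1))).map
        (fun p => r * w + p.1))))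
    ((PySem.List.pyRange 0 w 1).flatMap (fun c =>
      ((PySem.List.pyGetD (colRunsB grid h w) c []).filter (fun p => decide (2 ≤ p.2 - p.1))).map
        (fun p => p.1 * w + c)))

def get_current_pattern_alt (clue_num : Int) (grid : List (List String)) (direction : String) (filled_grid : List (List String)) : Option String :=
  let h : Int := grid.length
  let w : Int := if (0 : Int) < grid.length then ((grid.getD 0 []).length : Int) else 0
  let order : List Int := PySem.List.sorted (startsB grid h w) (fun x => x)
  if 1 ≤ clue_num ∧ clue_num ≤ (order.length : Int) then
    match PySem.List.pyGet? order (clue_num - 1) with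
    | none => none       -- unreachable: the guard puts the index in range
    | some idx =>
      match PySem.Int.divmod? idx w with
      | none => none     -- unreachable: w > 0 whenever a numbered cell exists
      | some (r, c) =>
        if direction == "across" then
          match (PySem.List.pyGetD (rowRunsB grid h w) r []).find? (fun p => decide (p.1 ≤ c ∧ c < p.2)) with
          | none => none -- unreachable: next() cannot raise, the start cell lies in a run
          | some p =>
            some (PySem.Str.join "" ((PySem.List.pyRange c p.2 1).map (fun j =>
              let x := gcell filled_grid r j
              if x == "-" then "?" else x)))
        else
          match (PySem.List.pyGetD (colRunsB grid h w) c []).find? (fun p => decide (p.1 ≤ r ∧ r < p.2)) with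
          | none => none -- unreachable: next() cannot raise, the start cell lies in a run
          | some p =>
            some (PySem.Str.join "" ((PySem.List.pyRange r p.2 1).map (fun i =>
              let x := gcell filled_grid i c
              if x == "-" then "?" else x)))
  else none

-- ===== PRECONDITION & SPEC =====
-- Pre_ excludes ragged grids (a row shorter than row 0) and, when clue_num lies in the grid's possible
-- numbering range 1..height*width (only then can A reach filled_grid), filled grids not covering grid's
-- rectangle: there Python A raises IndexError on most inputs, and where its scan happens to stop before
-- the bad access it still returns (examples cited in claim.json); B scans the whole grid up front.
def Pre_get_current_pattern (clue_num : Int) (grid : List (List String)) (direction : String) (filled_grid : List (List String)) : Prop :=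
  (∀ row ∈ grid, (grid.getD 0 []).length ≤ row.length) ∧
  (1 ≤ clue_num ∧ clue_num ≤ (grid.length : Int) * ((grid.getD 0 []).length : Int) →
    grid.length ≤ filled_grid.length ∧
    ∀ row ∈ filled_grid, (grid.getD 0 []).length ≤ row.length)
instance (clue_num : Int) (grid : List (List String)) (direction : String) (filled_grid : List (List String)) : Decidable (Pre_get_current_pattern clue_num grid direction filled_grid) := by unfold Pre_get_current_pattern; infer_instance

def pvWitness_get_current_pattern : Int × List (List String) × String × List (List String) :=
  (1, [["A", "B"]], "across", [["-", "B"]])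

def Spec_get_current_pattern (clue_num : Int) (grid : List (List String)) (direction : String) (filled_grid : List (List String)) (out : Option String) : Prop := out = get_current_pattern_alt clue_num grid direction filled_grid
instance (clue_num : Int) (grid : List (List String)) (direction : String) (filled_grid : List (List String)) (out : Option String) : Decidable (Spec_get_current_pattern clue_num grid direction filled_grid out) := by unfold Spec_get_current_pattern; infer_instance

-- ===== CLAIM (what is proved, stated in full; the proofs are below) =====
def Claim_equal_get_current_pattern : Prop := ∀ (clue_num : Int) (grid : List (List String)) (direction : String) (filled_grid : List (List String)), Dom_get_current_pattern clue_num grid direction filled_grid → Pre_get_current_pattern clue_num grid direction filled_grid → Spec_get_current_pattern clue_num grid direction filled_grid (get_current_pattern clue_num grid direction filled_grid)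

-- ===== LEMMAS AND PROOFS =====

-- the numbered-cell test of A's scan, and the row-major list of numbered positions
def numberedB (grid : List (List String)) (h w r c : Int) : Bool :=
  !(gcell grid r c == ".") && (startsAcross grid w r c || startsDown grid h r c)

def Ppos (grid : List (List String)) (h w : Int) : List (Int × Int) :=
  (PySem.List.pyRange 0 h 1).flatMap (fun r =>
    ((PySem.List.pyRange 0 w 1).filter (fun c => numberedB grid h w r c)).map (fun c => (r, c)))

-- ---- A-side: the counter scan selects the clue_num-th element of Ppos ----
def scanPos (clue : Int) : List (Int × Int) → Int → Sum (Int × Int) Int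
  | [], num => Sum.inr num
  | p :: t, num => if num == clue then Sum.inl p else scanPos clue t (num + 1)

theorem fcpCols_eq_scan (clue : Int) (grid : List (List String)) (h w row : Int) :
    ∀ (cols : List Int) (num : Int),
      fcpCols clue grid h w row cols num =
        scanPos clue ((cols.filter (fun c => numberedB grid h w row c)).map (fun c => (row, c))) num := by
  intro cols
  induction cols with
  | nil => intro num; rfl
  | cons c rest ih =>
    intro num
    by_cases h1 : gcell grid row c == "."
    · simp [fcpCols, numberedB, h1, ih]
    · by_cases h2 : (startsAcross grid w row c || startsDown grid h row c) = true
      · simp [fcpCols, numberedB, h1, h2, scanPos, ih]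
      · simp [fcpCols, numberedB, h1, h2, ih]

theorem scanPos_append (clue : Int) :
    ∀ (l1 l2 : List (Int × Int)) (num : Int),
      scanPos clue (l1 ++ l2) num =
        match scanPos clue l1 num with
        | Sum.inl p => Sum.inl p
        | Sum.inr n => scanPos clue l2 n := by
  intro l1
  induction l1 with
  | nil => intro l2 num; rfl
  | cons p t ih =>
    intro l2 num
    by_cases h1 : num == clue
    · simp [scanPos, h1]
    · simp [scanPos, h1, ih]

theorem fcpRows_eq_scan (clue : Int) (grid : List (List String)) (h w : Int) :
    ∀ (rows : List Int) (num : Int),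
      fcpRows clue grid h w rows num =
        match scanPos clue (rows.flatMap (fun r =>
            ((PySem.List.pyRange 0 w 1).filter (fun c => numberedB grid h w r c)).map (fun c => (r, c)))) num with
        | Sum.inl p => some p
        | Sum.inr _ => none := by
  intro rows
  induction rows with
  | nil => intro num; rfl
  | cons row rest ih =>
    intro num
    simp only [List.flatMap_cons, scanPos_append]
    rw [fcpRows, fcpCols_eq_scan]
    cases hs : scanPos clue ((( PySem.List.pyRange 0 w 1).filter (fun c => numberedB grid h w row c)).map (fun c => (row, c))) num with
    | inl p => rfl
    | inr n => exact ih n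

theorem scanPos_out (clue : Int) :
    ∀ (l : List (Int × Int)) (num : Int), ¬ (num ≤ clue ∧ clue < num + (l.length : Int)) →
      scanPos clue l num = Sum.inr (num + l.length) := by
  intro l
  induction l with
  | nil => intro num _; simp [scanPos]
  | cons p t ih =>
    intro num hn
    simp only [List.length_cons] at hn ⊢
    have h1 : ¬ (num == clue) = true := by simp; omega
    rw [scanPos, if_neg h1, ih (num + 1) (by push_cast at hn ⊢; omega)]
    congr 1
    push_cast
    ring

theorem scanPos_in (clue : Int) :
    ∀ (l : List (Int × Int)) (num : Int), num ≤ clue → clue < num + (l.length : Int) →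
      scanPos clue l num = Sum.inl (l.getD (clue - num).toNat (0, 0)) := by
  intro l
  induction l with
  | nil => intro num h1 h2; simp at h2; omega
  | cons p t ih =>
    intro num h1 h2
    by_cases he : num == clue
    · have : (clue - num).toNat = 0 := by simp at he; omega
      simp [scanPos, he, this]
    · have hlt : num + 1 ≤ clue := by simp at he; omega
      rw [scanPos, if_neg (by simpa using he), ih (num + 1) hlt (by simp at h2 ⊢; omega)]
      have : (clue - num).toNat = (clue - (num + 1)).toNat + 1 := by omega
      simp [this]

-- ---- B-side: facts about countRun ----
theorem getD_drop (l : List String) (n m : Nat) (d : String) :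
    (l.drop n).getD m d = l.getD (n + m) d := by
  simp [List.getD_eq_getElem?_getD, List.getElem?_drop]

theorem countRun_le_length : ∀ l : List String, countRun l ≤ l.length := by
  intro l
  induction l with
  | nil => simp [countRun]
  | cons x t ih => rw [countRun]; split <;> simp <;> omega

theorem countRun_getD_lt : ∀ (l : List String) (j : Nat), j < countRun l → l.getD j "" ≠ "." := by
  intro l
  induction l with
  | nil => simp [countRun]
  | cons x t ih =>
    intro j hj
    rw [countRun] at hj
    by_cases hx : x == "."
    · simp [hx] at hj
    · rw [if_neg hx] at hj
      cases j with
      | zero => simpa using hx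
      | succ j' => simpa using ih j' (by omega)

theorem countRun_getD_eq : ∀ (l : List String), countRun l < l.length → l.getD (countRun l) "" = "." := by
  intro l
  induction l with
  | nil => simp [countRun]
  | cons x t ih =>
    intro hl
    rw [countRun] at hl ⊢
    by_cases hx : x == "."
    · have hx' := eq_of_beq hx
      simp [hx']
    · rw [if_neg hx] at hl ⊢
      simpa using ih (by simpa using hl)

theorem countRun_drop : ∀ (l : List String) (j : Nat), j ≤ countRun l → countRun (l.drop j) = countRun l - j := by
  intro l
  induction l with
  | nil => intro j hj; simp [countRun]
  | cons x t ih =>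
    intro j hj
    cases j with
    | zero => simp
    | succ j' =>
      rw [countRun] at hj ⊢
      by_cases hx : x == "."
      · simp [hx] at hj
      · rw [if_neg hx] at hj ⊢
        simpa using ih j' (by omega)

theorem one_le_countRun_drop (l : List String) (m : Nat) :
    1 ≤ countRun (l.drop m) ↔ m < l.length ∧ l.getD m "" ≠ "." := by
  by_cases hm : m < l.length
  · rw [List.drop_eq_getElem_cons hm, countRun]
    constructor
    · intro h1
      refine ⟨hm, ?_⟩
      by_cases hx : l[m] == "."
      · simp [hx] at h1
      · rw [List.getD_eq_getElem l "" hm]; simpa using hx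
    · rintro ⟨-, hne⟩
      rw [List.getD_eq_getElem l "" hm] at hne
      rw [if_neg (by simpa using hne)]
      omega
  · rw [List.drop_eq_nil_of_le (by omega)]
    simp [countRun]
    omega

-- ---- B-side: characterization of runs(cells) ----
theorem mem_runsGo : ∀ (cells : List String) (i : Int) (p q : Int),
    (p, q) ∈ runsGo cells i ↔ ∃ a : Nat, a < cells.length ∧ p = i + a ∧
      q = i + a + 1 + countRun (cells.drop (a + 1)) ∧ cells.getD a "" ≠ "." ∧
      (a = 0 ∨ cells.getD (a - 1) "" = ".") := by
  intro cells i
  induction cells, i using runsGo.induct with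
  | case1 i => intro p q; simp [runsGo]
  | case2 x t i hx ih =>
    intro p q
    have hx' : x = "." := eq_of_beq hx
    rw [runsGo, if_pos hx, ih p q]
    constructor
    · rintro ⟨b, hb, hp, hq, hne, hprev⟩
      refine ⟨b + 1, by simpa using hb, by push_cast at hp ⊢; omega, ?_, by simpa using hne, ?_⟩
      · rw [List.drop_succ_cons]
        push_cast at hq ⊢
        omega
      · right
        cases b with
        | zero => simpa using hx'
        | succ b' =>
          rcases hprev with h0 | hprev
          · omega
          · simpa using hprev
    · rintro ⟨a, ha, hp, hq, hne, hprev⟩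
      cases a with
      | zero => rw [List.getD_cons_zero] at hne; exact absurd hx' hne
      | succ b =>
        refine ⟨b, by simpa using ha, by push_cast at hp ⊢; omega, ?_, by simpa using hne, ?_⟩
        · rw [List.drop_succ_cons] at hq
          push_cast at hq ⊢
          omega
        · cases b with
          | zero => left; rfl
          | succ b' =>
            rcases hprev with h0 | hprev
            · omega
            · right; simpa using hprev
  | case3 x t i hx ih =>
    intro p q
    have hkl : countRun t ≤ t.length := countRun_le_length t
    rw [runsGo, if_neg hx]
    simp only [List.mem_cons, ih p q]
    constructor
    · rintro (heq | ⟨b, hb, hp, hq, hne, hprev⟩)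
      · refine ⟨0, by simp, ?_, ?_, ?_, Or.inl rfl⟩
        · simpa using congrArg Prod.fst heq
        · have hq' := congrArg Prod.snd heq
          simp only at hq'
          simp [hq']
        · rw [List.getD_cons_zero]
          simpa using hx
      · rw [List.length_drop] at hb
        have hb1 : 1 ≤ b := by
          by_contra hb0
          have hb0' : b = 0 := by omega
          subst hb0'
          rw [getD_drop] at hne
          exact hne (countRun_getD_eq t (by omega))
        refine ⟨countRun t + 1 + b, by simpa using by omega, by push_cast at hp ⊢; omega, ?_, ?_, ?_⟩
        · have hdd : (t.drop (countRun t)).drop (b + 1) = (x :: t).drop (countRun t + 1 + b + 1) := by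
            rw [List.drop_drop, List.drop_succ_cons]
            congr 1
            omega
          rw [hdd] at hq
          push_cast at hq ⊢
          omega
        · have : (x :: t).getD (countRun t + 1 + b) "" = (t.drop (countRun t)).getD b "" := by
            have h1 : countRun t + 1 + b = (countRun t + b) + 1 := by omega
            rw [h1, List.getD_cons_succ, getD_drop]
          rw [this]
          exact hne
        · right
          have h1 : countRun t + 1 + b - 1 = (countRun t + (b - 1)) + 1 := by omega
          rw [h1, List.getD_cons_succ, ← getD_drop]
          rcases hprev with h0 | hprev
          · omega
          · exact hprev
    · rintro ⟨a, ha, hp, hq, hne, hprev⟩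
      rcases Nat.eq_zero_or_pos a with ha0 | hapos
      · subst ha0
        left
        rw [List.drop_succ_cons, List.drop_zero] at hq
        simp only [Nat.cast_zero, add_zero] at hp hq
        rw [Prod.ext_iff]
        exact ⟨hp, by omega⟩
      · rcases hprev with h0 | hprev
        · omega
        · have ha2 : 2 ≤ a := by
            by_contra h2
            have ha1 : a = 1 := by omega
            rw [ha1] at hprev
            simp only [Nat.sub_self, List.getD_cons_zero] at hprev
            exact hx (by simp [hprev])
          have hta : t.getD (a - 2) "" = "." := by
            have h1 : a - 1 = (a - 2) + 1 := by omega
            rw [h1, List.getD_cons_succ] at hprev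
            exact hprev
          have hak : countRun t + 2 ≤ a := by
            by_contra hlt
            exact countRun_getD_lt t (a - 2) (by omega) hta
          right
          refine ⟨a - countRun t - 1, ?_, by omega, ?_, ?_, ?_⟩
          · rw [List.length_drop]
            simp at ha
            omega
          · have hdd : (t.drop (countRun t)).drop ((a - countRun t - 1) + 1) = (x :: t).drop (a + 1) := by
              rw [List.drop_drop, List.drop_succ_cons]
              congr 1
              omega
            rw [hdd]
            omega
          · rw [getD_drop]
            have h1 : countRun t + (a - countRun t - 1) = (a - 1) := by omega
            rw [h1]
            have h2 : a = (a - 1) + 1 := by omega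
            rw [h2, List.getD_cons_succ] at hne
            exact hne
          · right
            rw [getD_drop]
            have h1 : countRun t + (a - countRun t - 1 - 1) = a - 2 := by omega
            rw [h1]
            exact hta

-- ---- B-side: next() over runs finds the run containing a non-'.' cell, ending where the cell's run ends ----
theorem find?_runsGo : ∀ (cells : List String) (i : Int) (j : Nat), j < cells.length →
    ¬ cells.getD j "" = "." →
    ∃ s : Int, (runsGo cells i).find? (fun p => decide (p.1 ≤ i + (j : Int) ∧ i + (j : Int) < p.2)) =
      some (s, i + (j : Int) + (countRun (cells.drop j) : Int)) := by
  intro cells i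
  induction cells, i using runsGo.induct with
  | case1 i => intro j hj; simp at hj
  | case2 x t i hx ih =>
    intro j hj hne
    cases j with
    | zero =>
      rw [List.getD_cons_zero] at hne
      exact absurd (eq_of_beq hx) hne
    | succ j' =>
      have hij : i + ((j' + 1 : Nat) : Int) = (i + 1) + (j' : Int) := by push_cast; ring
      rw [runsGo, if_pos hx, hij, List.drop_succ_cons]
      exact ih j' (by simpa using hj) (by simpa using hne)
  | case3 x t i hx ih =>
    intro j hj hne
    have hkl : countRun t ≤ t.length := countRun_le_length t
    rw [runsGo, if_neg hx]
    by_cases hjk : j ≤ countRun t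
    · rw [List.find?_cons_of_pos (by simp; omega)]
      refine ⟨i, ?_⟩
      cases j with
      | zero =>
        rw [List.drop_zero]
        have hc : countRun (x :: t) = countRun t + 1 := by rw [countRun, if_neg hx]
        rw [hc]
        push_cast
        ring_nf
      | succ j' =>
        rw [List.drop_succ_cons, countRun_drop t j' (by omega)]
        simp only [Option.some.injEq, Prod.mk.injEq, true_and]
        push_cast
        omega
    · rw [List.find?_cons_of_neg (by simp; omega)]
      have hj1 : countRun t + 1 ≤ j := by omega
      have hjt : j ≤ t.length := by simpa using Nat.lt_succ_iff.mp (by simpa using hj)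
      have hij : i + (j : Int) = (i + 1 + (countRun t : Int)) + ((j - countRun t - 1 : Nat) : Int) := by
        omega
      have hdd : (t.drop (countRun t)).drop (j - countRun t - 1) = (x :: t).drop j := by
        rw [List.drop_drop]
        have h1 : j = (j - 1) + 1 := by omega
        rw [h1, List.drop_succ_cons]
        congr 1
        omega
      rw [hij, ← hdd]
      refine ih (j - countRun t - 1) ?_ ?_
      · rw [List.length_drop]
        omega
      · rw [getD_drop]
        have h1 : countRun t + (j - countRun t - 1) = j - 1 := by omega
        rw [h1]
        have h2 : j = (j - 1) + 1 := by omega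
        rw [h2, List.getD_cons_succ] at hne
        exact hne

-- ---- line cells (a row or column read through gcell) ----
theorem lineCells_getD (f : Int → String) (n : Int) (j : Nat) (hj : (j : Int) < n) :
    (((PySem.List.pyRange 0 n 1).map f).getD j "") = f j := by
  have hl : j < ((PySem.List.pyRange 0 n 1).map f).length := by
    simp [PySem.List.length_pyRange_one]; omega
  rw [List.getD_eq_getElem _ "" hl]
  simp [PySem.List.getElem_pyRange_one]

theorem lineCells_length (f : Int → String) (n : Int) :
    ((PySem.List.pyRange 0 n 1).map f).length = n.toNat := by
  simp [PySem.List.length_pyRange_one]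

-- a run of length ≥ 2 starts at t iff the cell is non-'.' and passes A's neighbour test
theorem lineStart_iff (f : Int → String) (n : Int) (t : Int) :
    (∃ e, ((t, e) ∈ runsGo ((PySem.List.pyRange 0 n 1).map f) 0) ∧ 2 ≤ e - t) ↔
    (0 ≤ t ∧ t < n ∧ ¬ f t = "." ∧
      (((t == 0 || f (t - 1) == ".") && decide (t + 1 < n) && !(f (t + 1) == ".")) = true)) := by
  have hlen : ((PySem.List.pyRange 0 n 1).map f).length = n.toNat := lineCells_length f n
  constructor
  · rintro ⟨e, hmem, he⟩
    rw [mem_runsGo] at hmem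
    obtain ⟨a, ha, hp, hq, hne, hprev⟩ := hmem
    rw [hlen] at ha
    have htn : (a : Int) < n := by omega
    have ht : t = (a : Int) := by omega
    have hcnt : 1 ≤ countRun (((PySem.List.pyRange 0 n 1).map f).drop (a + 1)) := by omega
    rw [one_le_countRun_drop, hlen] at hcnt
    obtain ⟨ha1, hne1⟩ := hcnt
    rw [lineCells_getD f n (a + 1) (by omega)] at hne1
    rw [lineCells_getD f n a htn] at hne
    refine ⟨by omega, by omega, by rw [ht]; exact hne, ?_⟩
    simp only [Bool.and_eq_true, Bool.or_eq_true, beq_iff_eq, decide_eq_true_eq,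
      Bool.not_eq_true', beq_eq_false_iff_ne]
    refine ⟨⟨?_, by omega⟩, ?_⟩
    · rcases hprev with h0 | hpd
      · left; omega
      · by_cases ha0 : a = 0
        · left; omega
        · right
          rw [lineCells_getD f n (a - 1) (by omega)] at hpd
          have : ((a - 1 : Nat) : Int) = t - 1 := by omega
          rw [this] at hpd
          exact hpd
    · have : ((a + 1 : Nat) : Int) = t + 1 := by omega
      rw [this] at hne1
      exact hne1
  · rintro ⟨ht0, htn, hft, hbool⟩
    simp only [Bool.and_eq_true, Bool.or_eq_true, beq_iff_eq, decide_eq_true_eq,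
      Bool.not_eq_true', beq_eq_false_iff_ne] at hbool
    obtain ⟨⟨hstart, hlt⟩, hright⟩ := hbool
    have hta : t = ((t.toNat : Nat) : Int) := by omega
    refine ⟨0 + (t.toNat : Int) + 1 +
      (countRun (((PySem.List.pyRange 0 n 1).map f).drop (t.toNat + 1)) : Int), ?_, ?_⟩
    · rw [mem_runsGo]
      refine ⟨t.toNat, by rw [hlen]; omega, by omega, rfl, ?_, ?_⟩
      · rw [lineCells_getD f n t.toNat (by omega), ← hta]
        exact hft
      · rcases hstart with h0 | hdot
        · left; omega
        · by_cases ht00 : t.toNat = 0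
          · left; omega
          · right
            rw [lineCells_getD f n (t.toNat - 1) (by omega)]
            have : ((t.toNat - 1 : Nat) : Int) = t - 1 := by omega
            rw [this]
            exact hdot
    · have h1 : 1 ≤ countRun (((PySem.List.pyRange 0 n 1).map f).drop (t.toNat + 1)) := by
        rw [one_le_countRun_drop, hlen]
        refine ⟨by omega, ?_⟩
        rw [lineCells_getD f n (t.toNat + 1) (by omega)]
        have : ((t.toNat + 1 : Nat) : Int) = t + 1 := by omega
        rw [this]
        exact hright
      omega

-- ---- A's length pass equals the length of the run suffix from the start cell ----
theorem lenAcross_eq_countRun (grid : List (List String)) (row w : Int) :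
    ∀ (fuel : Nat) (c : Int), 0 ≤ c → (w - c).toNat ≤ fuel →
      lenAcross grid row (PySem.List.pyRange c w 1) =
        (countRun ((rowCells grid w row).drop c.toNat) : Int) := by
  intro fuel
  induction fuel with
  | zero =>
    intro c hc hfc
    have hwc : w ≤ c := by omega
    rw [PySem.List.pyRange_one_eq_nil hwc, lenAcross,
      List.drop_eq_nil_of_le (by simp only [rowCells]; rw [lineCells_length]; omega)]
    simp [countRun]
  | succ fuel ih =>
    intro c hc hfc
    by_cases hcw : c < w
    · have hcl : c.toNat < (rowCells grid w row).length := by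
        simp only [rowCells]; rw [lineCells_length]; omega
      rw [PySem.List.pyRange_one_cons hcw, lenAcross,
        List.drop_eq_getElem_cons hcl, countRun]
      have hcell : (rowCells grid w row)[c.toNat] = gcell grid row c := by
        simp only [rowCells]; rw [List.getElem_map, PySem.List.getElem_pyRange_one]
        congr 1
        omega
      rw [hcell]
      by_cases hdot : gcell grid row c == "."
      · simp [hdot]
      · rw [if_neg hdot, if_neg hdot, ih (c + 1) (by omega) (by omega)]
        have : (c + 1).toNat = c.toNat + 1 := by omega
        rw [this]
        push_cast
        ring
    · have hwc : w ≤ c := by omega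
      rw [PySem.List.pyRange_one_eq_nil hwc, lenAcross,
        List.drop_eq_nil_of_le (by simp only [rowCells]; rw [lineCells_length]; omega)]
      simp [countRun]

theorem lenDown_eq_countRun (grid : List (List String)) (col h : Int) :
    ∀ (fuel : Nat) (r : Int), 0 ≤ r → (h - r).toNat ≤ fuel →
      lenDown grid col (PySem.List.pyRange r h 1) =
        (countRun ((colCells grid h col).drop r.toNat) : Int) := by
  intro fuel
  induction fuel with
  | zero =>
    intro r hr hfr
    have hhr : h ≤ r := by omega
    rw [PySem.List.pyRange_one_eq_nil hhr, lenDown,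
      List.drop_eq_nil_of_le (by simp only [colCells]; rw [lineCells_length]; omega)]
    simp [countRun]
  | succ fuel ih =>
    intro r hr hfr
    by_cases hrh : r < h
    · have hrl : r.toNat < (colCells grid h col).length := by
        simp only [colCells]; rw [lineCells_length]; omega
      rw [PySem.List.pyRange_one_cons hrh, lenDown,
        List.drop_eq_getElem_cons hrl, countRun]
      have hcell : (colCells grid h col)[r.toNat] = gcell grid r col := by
        simp only [colCells]; rw [List.getElem_map, PySem.List.getElem_pyRange_one]
        congr 1
        omega
      rw [hcell]
      by_cases hdot : gcell grid r col == "."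
      · simp [hdot]
      · rw [if_neg hdot, if_neg hdot, ih (r + 1) (by omega) (by omega)]
        have : (r + 1).toNat = r.toNat + 1 := by omega
        rw [this]
        push_cast
        ring
    · have hhr : h ≤ r := by omega
      rw [PySem.List.pyRange_one_eq_nil hhr, lenDown,
        List.drop_eq_nil_of_le (by simp only [colCells]; rw [lineCells_length]; omega)]
      simp [countRun]

-- reindexing a range comprehension
theorem pyRange_shift_map {α : Type} (a L : Int) (g : Int → α) :
    ((PySem.List.pyRange a (a + L) 1).map g) = (PySem.List.pyRange 0 L 1).map (fun i => g (a + i)) := by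
  simp [PySem.List.pyRange_one]

-- membership in the row-major list of numbered positions
theorem mem_Ppos (grid : List (List String)) (h w r c : Int) :
    (r, c) ∈ Ppos grid h w ↔ (0 ≤ r ∧ r < h) ∧ (0 ≤ c ∧ c < w) ∧ numberedB grid h w r c = true := by
  simp only [Ppos, List.mem_flatMap, List.mem_map, List.mem_filter, PySem.List.mem_pyRange_one]
  constructor
  · rintro ⟨r', hr', c', ⟨hc', hnum⟩, heq⟩
    obtain ⟨h1, h2⟩ := Prod.mk.injEq .. ▸ heq
    subst h1; subst h2
    exact ⟨hr', hc', hnum⟩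
  · rintro ⟨hr, hc, hnum⟩
    exact ⟨r, hr, c, ⟨hc, hnum⟩, rfl⟩

-- membership in the set of flat indices
theorem mem_startsB (grid : List (List String)) (h w : Int) (x : Int) :
    x ∈ startsB grid h w ↔ ∃ r c : Int, (0 ≤ r ∧ r < h) ∧ (0 ≤ c ∧ c < w) ∧
      numberedB grid h w r c = true ∧ x = r * w + c := by
  rw [startsB, PySem.Set.mem_union, PySem.Set.mem_ofList]
  simp only [List.mem_flatMap, List.mem_map, List.mem_filter, PySem.List.mem_pyRange_one,
    decide_eq_true_eq]
  constructor
  · rintro (⟨r, ⟨hr0, hrh⟩, p, ⟨hp, h2⟩, hx⟩ | ⟨c, ⟨hc0, hcw⟩, p, ⟨hp, h2⟩, hx⟩)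
    · rw [show PySem.List.pyGetD (rowRunsB grid h w) r [] = runsB (rowCells grid w r) from by
        simp only [rowRunsB]; exact PySem.List.pyGetD_map_pyRange_of_nonneg _ h r [] hr0 hrh] at hp
      obtain ⟨t, e⟩ := p
      obtain ⟨ht0, htw, hne, hbool⟩ :=
        (lineStart_iff (fun cc => gcell grid r cc) w t).mp ⟨e, hp, h2⟩
      refine ⟨r, t, ⟨hr0, hrh⟩, ⟨ht0, htw⟩, ?_, hx.symm⟩
      rw [numberedB]
      simp only [Bool.and_eq_true, Bool.not_eq_true', beq_eq_false_iff_ne, Bool.or_eq_true]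
      exact ⟨hne, Or.inl hbool⟩
    · rw [show PySem.List.pyGetD (colRunsB grid h w) c [] = runsB (colCells grid h c) from by
        simp only [colRunsB]; exact PySem.List.pyGetD_map_pyRange_of_nonneg _ w c [] hc0 hcw] at hp
      obtain ⟨t, e⟩ := p
      obtain ⟨ht0, hth, hne, hbool⟩ :=
        (lineStart_iff (fun rr => gcell grid rr c) h t).mp ⟨e, hp, h2⟩
      refine ⟨t, c, ⟨ht0, hth⟩, ⟨hc0, hcw⟩, ?_, hx.symm⟩
      rw [numberedB]
      simp only [Bool.and_eq_true, Bool.not_eq_true', beq_eq_false_iff_ne, Bool.or_eq_true]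
      exact ⟨hne, Or.inr hbool⟩
  · rintro ⟨r, c, ⟨hr0, hrh⟩, ⟨hc0, hcw⟩, hnum, hx⟩
    rw [numberedB] at hnum
    simp only [Bool.and_eq_true, Bool.not_eq_true', beq_eq_false_iff_ne, Bool.or_eq_true] at hnum
    obtain ⟨hne, hsa | hsd⟩ := hnum
    · left
      obtain ⟨e, hmem, h2⟩ := (lineStart_iff (fun cc => gcell grid r cc) w c).mpr ⟨hc0, hcw, hne, hsa⟩
      refine ⟨r, ⟨hr0, hrh⟩, (c, e), ⟨?_, h2⟩, hx.symm⟩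
      rw [show PySem.List.pyGetD (rowRunsB grid h w) r [] = runsB (rowCells grid w r) from by
        simp only [rowRunsB]; exact PySem.List.pyGetD_map_pyRange_of_nonneg _ h r [] hr0 hrh]
      exact hmem
    · right
      obtain ⟨e, hmem, h2⟩ := (lineStart_iff (fun rr => gcell grid rr c) h r).mpr ⟨hr0, hrh, hne, hsd⟩
      refine ⟨c, ⟨hc0, hcw⟩, (r, e), ⟨?_, h2⟩, hx.symm⟩
      rw [show PySem.List.pyGetD (colRunsB grid h w) c [] = runsB (colCells grid h c) from by
        simp only [colRunsB]; exact PySem.List.pyGetD_map_pyRange_of_nonneg _ w c [] hc0 hcw]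
      exact hmem

theorem mem_Ppos_map (grid : List (List String)) (h w x : Int) :
    x ∈ (Ppos grid h w).map (fun p => p.1 * w + p.2) ↔ ∃ r c : Int, (0 ≤ r ∧ r < h) ∧ (0 ≤ c ∧ c < w) ∧
      numberedB grid h w r c = true ∧ x = r * w + c := by
  simp only [List.mem_map]
  constructor
  · rintro ⟨⟨r, c⟩, hmem, hx⟩
    obtain ⟨hr, hc, hnum⟩ := (mem_Ppos grid h w r c).mp hmem
    exact ⟨r, c, hr, hc, hnum, hx.symm⟩
  · rintro ⟨r, c, hr, hc, hnum, hx⟩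
    exact ⟨(r, c), (mem_Ppos grid h w r c).mpr ⟨hr, hc, hnum⟩, hx.symm⟩

-- the flat indices are strictly increasing along the row-major order
theorem pairwise_Ppos_map (grid : List (List String)) (h w : Int) (hw : 0 ≤ w) :
    ((Ppos grid h w).map (fun p => p.1 * w + p.2)).Pairwise (· < ·) := by
  rw [Ppos, List.map_flatMap, List.pairwise_flatMap]
  constructor
  · intro r hr
    rw [List.map_map]
    refine List.pairwise_map.mpr ?_
    refine ((PySem.List.pairwise_lt_pyRange_one 0 w).filter _).imp ?_
    intro a b hab
    simpa using add_lt_add_left hab (r * w)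
  · refine ((PySem.List.pairwise_lt_pyRange_one 0 h).imp_of_mem ?_)
    intro r1 r2 _ _ hlt x hx y hy
    rw [List.map_map] at hx hy
    simp only [List.mem_map, List.mem_filter, PySem.List.mem_pyRange_one, Function.comp] at hx hy
    obtain ⟨a, ⟨⟨ha0, haw⟩, -⟩, hxa⟩ := hx
    obtain ⟨b, ⟨⟨hb0, hbw⟩, -⟩, hyb⟩ := hy
    have hmul : (r1 + 1) * w ≤ r2 * w := mul_le_mul_of_nonneg_right (by omega) hw
    rw [← hxa, ← hyb]
    nlinarith [hmul]

-- ---- the sorted set of flat indices is exactly Ppos in row-major order ----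
theorem order_eq (grid : List (List String)) (h w : Int) (hw : 0 ≤ w) :
    PySem.List.sorted (startsB grid h w) (fun x => x) =
      (Ppos grid h w).map (fun p => p.1 * w + p.2) := by
  apply PySem.List.sorted_eq_of_perm_of_pairwise_lt
  · rw [List.perm_ext_iff_of_nodup
      ((pairwise_Ppos_map grid h w hw).imp (fun hlt => ne_of_lt hlt))
      (by rw [startsB]; exact PySem.Set.nodup_union _ _ (PySem.Set.nodup_ofList _))]
    intro x
    rw [mem_Ppos_map, mem_startsB]
  · exact pairwise_Ppos_map grid h w hw

-- ===== VERDICT (by name: the statement is the Claim_ definition above) =====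
theorem get_current_pattern_spec : Claim_equal_get_current_pattern := by
  intro clue_num grid direction filled_grid _dom _pre
  unfold Spec_get_current_pattern get_current_pattern get_current_pattern_alt get_clue_info find_clue_position
  simp only []
  set W : Int := if (0 : Int) < (grid.length : Int) then ((grid.getD 0 []).length : Int) else 0 with hW
  set H : Int := (grid.length : Int) with hH
  have hW0 : 0 ≤ W := by rw [hW]; split <;> simp
  rw [fcpRows_eq_scan]
  rw [show (PySem.List.pyRange 0 H 1).flatMap (fun r =>
      ((PySem.List.pyRange 0 W 1).filter (fun c => numberedB grid H W r c)).map (fun c => (r, c))) =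
      Ppos grid H W from rfl]
  rw [order_eq grid H W hW0]
  have hlen : ((Ppos grid H W).map (fun p => p.1 * W + p.2)).length = (Ppos grid H W).length :=
    List.length_map ..
  by_cases hin : 1 ≤ clue_num ∧ clue_num ≤ ((Ppos grid H W).length : Int)
  · have hlt : (clue_num - 1).toNat < (Ppos grid H W).length := by omega
    rw [scanPos_in clue_num (Ppos grid H W) 1 (by omega) (by omega)]
    rw [if_pos (show 1 ≤ clue_num ∧ clue_num ≤ (((Ppos grid H W).map (fun p => p.1 * W + p.2)).length : Int) by rw [hlen]; exact hin)]
    rw [PySem.List.pyGet?_eq_some_getElem _ (by omega) (by rw [hlen]; omega)]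
    rw [List.getElem_map]
    rw [List.getD_eq_getElem (Ppos grid H W) (0, 0) hlt]
    obtain ⟨pr, hpr, hmem⟩ : ∃ pr, (Ppos grid H W)[(clue_num - 1).toNat] = pr ∧ pr ∈ Ppos grid H W :=
      ⟨_, rfl, List.getElem_mem hlt⟩
    rw [hpr]
    obtain ⟨r, c⟩ := pr
    obtain ⟨⟨hr0, hrH⟩, ⟨hc0, hcW⟩, hnum⟩ := (mem_Ppos grid H W r c).mp hmem
    have hWpos : 0 < W := by omega
    simp only []
    have hfd : PySem.Int.floordiv (r * W + c) W = r := by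
      rw [PySem.Int.floordiv_eq_iff_of_pos hWpos]
      constructor <;> nlinarith
    have hmd : PySem.Int.mod (r * W + c) W = c := by
      have hh := PySem.Int.floordiv_mul_add_mod (r * W + c) W
      rw [hfd] at hh
      linarith
    have hdm : PySem.Int.divmod? (r * W + c) W = some (r, c) := by
      have hfd' : (r * W + c).fdiv W = r := hfd
      have hmd' : (r * W + c).fmod W = c := hmd
      simp only [PySem.Int.divmod?, if_neg (by omega : ¬ W = 0)]
      rw [hfd', hmd']
    rw [hdm]
    rw [numberedB] at hnum
    simp only [Bool.and_eq_true, Bool.not_eq_true', beq_eq_false_iff_ne, Bool.or_eq_true] at hnum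
    obtain ⟨hne, -⟩ := hnum
    by_cases hdir : (direction == "across") = true
    · simp only [hdir, if_true]
      have hrr : PySem.List.pyGetD (rowRunsB grid H W) r [] = runsB (rowCells grid W r) := by
        simp only [rowRunsB]
        exact PySem.List.pyGetD_map_pyRange_of_nonneg _ H r [] hr0 hrH
      rw [hrr]
      have hcl : c.toNat < (rowCells grid W r).length := by
        simp only [rowCells]; rw [lineCells_length]; omega
      have hcd : ¬ (rowCells grid W r).getD c.toNat "" = "." := by
        simp only [rowCells]
        rw [lineCells_getD _ _ _ (by omega)]
        have hcc : ((c.toNat : Nat) : Int) = c := by omega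
        rw [hcc]
        exact hne
      obtain ⟨s, hfind⟩ := find?_runsGo (rowCells grid W r) 0 c.toNat hcl hcd
      have h0c : (0 : Int) + (c.toNat : Int) = c := by omega
      rw [h0c] at hfind
      rw [show runsB (rowCells grid W r) = runsGo (rowCells grid W r) 0 from rfl, hfind]
      rw [lenAcross_eq_countRun grid r W ((W - c).toNat) c hc0 le_rfl]
      simp only []
      rw [pyRange_shift_map c (countRun ((rowCells grid W r).drop c.toNat) : Int)
        (fun j => let x := gcell filled_grid r j; if x == "-" then "?" else x)]
    · simp only [hdir]
      have hcc : PySem.List.pyGetD (colRunsB grid H W) c [] = runsB (colCells grid H c) := by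
        simp only [colRunsB]
        exact PySem.List.pyGetD_map_pyRange_of_nonneg _ W c [] hc0 hcW
      rw [hcc]
      have hrl : r.toNat < (colCells grid H c).length := by
        simp only [colCells]; rw [lineCells_length]; omega
      have hrd : ¬ (colCells grid H c).getD r.toNat "" = "." := by
        simp only [colCells]
        rw [lineCells_getD _ _ _ (by omega)]
        have hrc : ((r.toNat : Nat) : Int) = r := by omega
        rw [hrc]
        exact hne
      obtain ⟨s, hfind⟩ := find?_runsGo (colCells grid H c) 0 r.toNat hrl hrd
      have h0r : (0 : Int) + (r.toNat : Int) = r := by omega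
      rw [h0r] at hfind
      rw [show runsB (colCells grid H c) = runsGo (colCells grid H c) 0 from rfl, hfind]
      rw [lenDown_eq_countRun grid c H ((H - r).toNat) r hr0 le_rfl]
      simp only []
      rw [pyRange_shift_map r (countRun ((colCells grid H c).drop r.toNat) : Int)
        (fun i => let x := gcell filled_grid i c; if x == "-" then "?" else x)]
      simp only [Bool.false_eq_true, if_false]
  · rw [scanPos_out clue_num (Ppos grid H W) 1 (by omega)]
    rw [if_neg (show ¬ (1 ≤ clue_num ∧ clue_num ≤ (((Ppos grid H W).map (fun p => p.1 * W + p.2)).length : Int)) by rw [hlen]; exact hin)]
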